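-- pv_equiv track=rewrite | github.com/dementive/ImperatorTools | imperator_plugin.py | write_syntax
-- ===== SOURCE A (Python) =====
-- def write_syntax(li, header, scope):
--     string = ""
--     count = 0
--     string += f"\n    # Generated {header}\n    - match: \\b("
--     for i in li:
--         count += 1
--         # Count is needed to split because columns are waaay too long for syntax regex
--         if count == 0:
--             string = f")\\b\n      scope: {scope}\n"
--             string += f"    # Generated {header}\n    - match: \\b({i}|"
--         elif count == 75:
--             string += f")\\b\n      scope: {scope}\n"
--             string += f"    # Generated {header}\n    - match: \\b({i}|"
--             count = 1
--         else:
--             string += f"{i}|"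
--     string += f")\\b\n      scope: {scope}"
--     return string
-- ===== SOURCE B (Python) =====
-- def write_syntax(li, header, scope):
--     # Different decomposition: explicit chunking (74 words per block) + join, no counter loop.
--     chunks = [li[k:k + 74] for k in range(0, len(li), 74)] or [[]]
--     blocks = [f"    # Generated {header}\n    - match: \\b(" + "".join(f"{w}|" for w in chunk)
--               for chunk in chunks]
--     sep = f")\\b\n      scope: {scope}\n"
--     return "\n" + sep.join(blocks) + f")\\b\n      scope: {scope}"
-- ===== Notes on version B (the rewrite author's own statement) =====
-- stated objective: simpler
-- what changed: Replaced the stateful counter loop (with its dead count==0 branch and in-loop block splitting) by explicit chunking of the word list into 74-word slices, formatting each chunk as a block and joining the blocks with the scope separator.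
import Mathlib
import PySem

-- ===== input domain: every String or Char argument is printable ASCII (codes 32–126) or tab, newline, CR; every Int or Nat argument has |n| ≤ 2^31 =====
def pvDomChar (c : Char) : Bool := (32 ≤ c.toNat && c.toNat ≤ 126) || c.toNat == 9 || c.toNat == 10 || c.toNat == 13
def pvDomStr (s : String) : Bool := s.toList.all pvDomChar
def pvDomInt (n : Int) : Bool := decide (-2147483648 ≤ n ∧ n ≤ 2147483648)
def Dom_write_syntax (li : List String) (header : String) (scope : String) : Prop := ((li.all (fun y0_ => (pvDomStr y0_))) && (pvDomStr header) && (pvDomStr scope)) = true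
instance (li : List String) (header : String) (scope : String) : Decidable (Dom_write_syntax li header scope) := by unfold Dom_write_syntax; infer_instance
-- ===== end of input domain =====

-- ===== PORT A =====
-- B rebuilds the same string by explicit 74-word chunking + join instead of A's counter loop; objective: simpler. Return value only; A mutates nothing.
def write_syntax (li : List String) (header : String) (scope : String) : String :=
  let string := ""
  let count : Int := 0
  let string := string ++ "\n    # Generated " ++ header ++ "\n    - match: \\b("
  let sc := li.foldl (fun (sc : String × Int) i =>
    let string := sc.1
    let count := sc.2 + 1
    if count == 0 then
      -- dead branch in Python (count is incremented before the test), ported literally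
      let string := ")\\b\n      scope: " ++ scope ++ "\n"
      (string ++ "    # Generated " ++ header ++ "\n    - match: \\b(" ++ i ++ "|", count)
    else if count == 75 then
      ((string ++ ")\\b\n      scope: " ++ scope ++ "\n") ++
        ("    # Generated " ++ header ++ "\n    - match: \\b(" ++ i ++ "|"), 1)
    else
      (string ++ (i ++ "|"), count)) (string, count)
  sc.1 ++ ")\\b\n      scope: " ++ scope

-- ===== PORT B =====
-- li[k:k+74] chunking, as in Source B (first chunk may be short only when li is short)
def pvChunks74 (l : List String) : List (List String) :=
  if l = [] then [] else l.take 74 :: pvChunks74 (l.drop 74)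
termination_by l.length
decreasing_by
  simp only [List.length_drop]
  have : l.length ≠ 0 := by simpa [List.length_eq_zero_iff] using (by assumption : ¬ l = [])
  omega

-- transcription of '"".join(f"{w}|" for w in chunk)'
def pvJoinBar : List String → String
  | [] => ""
  | w :: ws => (w ++ "|") ++ pvJoinBar ws

-- transcription of 'sep.join(blocks)'
def pvJoinSep (sep : String) : List String → String
  | [] => ""
  | [a] => a
  | a :: b :: t => (a ++ sep) ++ pvJoinSep sep (b :: t)

def write_syntax_alt (li : List String) (header : String) (scope : String) : String :=
  let chunks := if pvChunks74 li = [] then [[]] else pvChunks74 li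
  let blocks := chunks.map (fun chunk =>
    ("    # Generated " ++ header ++ "\n    - match: \\b(") ++ pvJoinBar chunk)
  let sep := ")\\b\n      scope: " ++ scope ++ "\n"
  ("\n" ++ pvJoinSep sep blocks) ++ (")\\b\n      scope: " ++ scope)

-- ===== PRECONDITION & SPEC =====
def Spec_write_syntax (li : List String) (header : String) (scope : String) (out : String) : Prop := out = write_syntax_alt li header scope
instance (li : List String) (header : String) (scope : String) (out : String) : Decidable (Spec_write_syntax li header scope out) := by unfold Spec_write_syntax; infer_instance

-- ===== CLAIM (what is proved, stated in full; the proofs are below) =====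
def Claim_equal_write_syntax : Prop := ∀ (li : List String) (header : String) (scope : String), Dom_write_syntax li header scope → Spec_write_syntax li header scope (write_syntax li header scope)

-- ===== LEMMAS AND PROOFS =====

-- gAux k l = text A's loop appends for remaining words l when the current chunk still has room for k words
def gAux (sep opener : String) : Nat → List String → String
  | _, [] => ""
  | 0, w :: ws => (sep ++ (opener ++ w ++ "|")) ++ gAux sep opener 73 ws
  | k + 1, w :: ws => (w ++ "|") ++ gAux sep opener k ws

theorem gAux_zero (sep opener : String) (l : List String) (h : l ≠ []) :
    gAux sep opener 0 l = sep ++ (opener ++ gAux sep opener 74 l) := by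
  cases l with
  | nil => exact absurd rfl h
  | cons w ws => simp [gAux, String.append_assoc]

-- A's fold, started with chunk-room k (count = 74 - k), appends gAux k l
theorem foldA (header scope : String) (l : List String) :
    ∀ (k : Nat) (s : String), k ≤ 74 →
    (l.foldl (fun (sc : String × Int) i =>
      let string := sc.1
      let count := sc.2 + 1
      if count == 0 then
        let string := ")\\b\n      scope: " ++ scope ++ "\n"
        (string ++ "    # Generated " ++ header ++ "\n    - match: \\b(" ++ i ++ "|", count)
      else if count == 75 then
        ((string ++ ")\\b\n      scope: " ++ scope ++ "\n") ++
          ("    # Generated " ++ header ++ "\n    - match: \\b(" ++ i ++ "|"), 1)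
      else
        (string ++ (i ++ "|"), count)) (s, ((74 : Int) - k))).1
    = s ++ gAux (")\\b\n      scope: " ++ scope ++ "\n")
          ("    # Generated " ++ header ++ "\n    - match: \\b(") k l := by
  induction l with
  | nil => intro k s hk; simp [gAux]
  | cons w ws ih =>
    intro k s hk
    match k with
    | 0 =>
      have h0 : ((74 : Int) - (0:Nat) + 1 == 0) = false := by decide
      have h75 : ((74 : Int) - (0:Nat) + 1 == 75) = true := by decide
      simp only [List.foldl_cons, h0, h75]
      have := ih 73 (s ++ (")\\b\n      scope: " ++ scope ++ "\n") ++
        ("    # Generated " ++ header ++ "\n    - match: \\b(" ++ w ++ "|")) (by omega)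
      simp only [show ((74 : Int) - (73:Nat)) = 1 by norm_num] at this
      simpa [gAux, String.append_assoc] using this
    | k + 1 =>
      have h0 : ((74 : Int) - ((k:Nat)+1:Nat) + 1 == 0) = false := by
        rw [beq_eq_false_iff_ne]; push_cast; omega
      have h75 : ((74 : Int) - ((k:Nat)+1:Nat) + 1 == 75) = false := by
        rw [beq_eq_false_iff_ne]; push_cast; omega
      simp only [List.foldl_cons, h0, h75]
      have heq : (74 : Int) - ((k:Nat)+1:Nat) + 1 = (74 : Int) - (k:Nat) := by push_cast; ring
      rw [heq]
      have := ih k (s ++ (w ++ "|")) (by omega)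
      simpa [gAux, String.append_assoc] using this

-- gAux splits off the first k words
theorem gAux_split (sep opener : String) (l : List String) :
    ∀ k : Nat, gAux sep opener k l =
      pvJoinBar (l.take k) ++ (if l.drop k = [] then "" else gAux sep opener 0 (l.drop k)) := by
  induction l with
  | nil => intro k; simp [gAux, pvJoinBar]
  | cons w ws ih =>
    intro k
    match k with
    | 0 => simp [pvJoinBar]
    | k + 1 => simp [gAux, pvJoinBar, ih k, String.append_assoc]

-- relating gAux at full room to B's chunk blocks
theorem gAux_chunks (sep opener : String) (l : List String) (hl : l ≠ []) :
    opener ++ gAux sep opener 74 l =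
      pvJoinSep sep ((pvChunks74 l).map (fun c => opener ++ pvJoinBar c)) := by
  have hlen : l.length ≤ l.length := le_refl _
  generalize hn : l.length = n at hlen
  clear hlen
  induction n using Nat.strong_induction_on generalizing l with
  | _ n ih =>
    rw [pvChunks74, if_neg hl]
    rw [gAux_split]
    by_cases hd : l.drop 74 = []
    · rw [if_pos hd, pvChunks74, if_pos hd]
      simp [pvJoinSep]
    · rw [if_neg hd, gAux_zero _ _ _ hd]
      have hcne : pvChunks74 (l.drop 74) ≠ [] := by
        rw [pvChunks74, if_neg hd]; simp
      have ihd := ih (l.drop 74).length (by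
          subst hn
          have : l.length ≠ 0 := by simpa [List.length_eq_zero_iff] using hl
          simp only [List.length_drop]; omega) (l.drop 74) hd rfl
      cases hc : (pvChunks74 (l.drop 74)).map (fun c => opener ++ pvJoinBar c) with
      | nil => exact absurd (by simpa using hc) hcne
      | cons b t =>
        rw [List.map_cons, hc]
        simp only [pvJoinSep]
        rw [hc] at ihd
        rw [← ihd]
        simp [String.append_assoc]

theorem write_syntax_eq (li : List String) (header scope : String) :
    write_syntax li header scope = write_syntax_alt li header scope := by
  unfold write_syntax write_syntax_alt
  simp only []
  have hA := foldA header scope li 74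
    ("" ++ "\n    # Generated " ++ header ++ "\n    - match: \\b(") (le_refl _)
  have h74 : ((74:Int) - ((74:Nat):Int)) = 0 := by norm_num
  rw [h74] at hA
  rw [hA]
  by_cases h : li = []
  · subst h
    simp [pvChunks74, gAux, pvJoinBar, pvJoinSep, ← String.append_assoc]
  · have hcne : pvChunks74 li ≠ [] := by rw [pvChunks74, if_neg h]; simp
    rw [if_neg hcne]
    rw [← gAux_chunks _ _ _ h]
    simp [← String.append_assoc]

-- ===== VERDICT (by name: the statement is the Claim_ definition above) =====
theorem write_syntax_spec : Claim_equal_write_syntax := by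
  intro li header scope _
  unfold Spec_write_syntax
  exact write_syntax_eq li header scope
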